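-- pv_equiv track=rewrite | github.com/edoardottt/programming-fundamentals | Workbook/Matrices/Matrices_3/program.py | es55
-- ===== SOURCE A (Python) =====
-- def es55(sel,m,n,A):
--     '''
--     la funzione es55(sel,m,n,A) che, presi in input:
--     - una stringa di testo contenente uno tra i caratteri 'r' e 'c'
--     - due interi m e n
--     - una matrice A di interi (rappresentata tramite lista di liste in cui
--     ciascuna lista e' una riga della matrice)
--     restituisce la coppia (tupla) di interi con  il minimo e il massimo tra gli
--     elementi della matrice e la modifica distruttivamente.
--     Al termine della funzione:
--     -se sel='r' allora la  riga m e la riga n della matrice A risultano scambiate tra loro.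
--     -se sel='c' allora la colonna m e la colonna n della matrice A risultano scambiate tra loro
--     Si puo' assumere che le dimensioni h e w della matrice siano tali che m,n <=h e m,n<=w.
--     Ad esempio:
--     - per sel='r', m=1,n=2 e A=[[2,0,-4],[5,10,20],[5,1,-1]] al termine dell'esecuzione della funzione
--       verra' restituita la tupla (-4,20) e  si avra' A=[[2,0,-4],[5,1,-1],[5,10,20]]
--     - per sel='c', m=0,n=1 e A=[[2,0,-4],[5,10,20],[5,1,-1]] al termine dell'esecuzione della funzione
--       verra' restituita la tupla (-4,20) e  si avra' A=[[0,2,-4],[10,5,20],[1,5,-1]]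
--     '''
--     mi = None
--     ma = None
--     for y in range(len(A)):
--         for x in range(len(A[0])):
--             e = A[y][x]
--             if mi==None or e<mi: mi = e
--             if ma==None or e>ma: ma = e
--     if sel=='r':
--         riga_m = A[m]
--         riga_n = A[n]
--         A[m] = riga_n
--         A[n] = riga_m
--     else:
--         col_m = [A[y][m] for y in range(len(A))]
--         col_n = [A[y][n] for y in range(len(A))]
--         for y in range(len(A)):
--             for x in range(len(A[0])):
--                 if x==m: A[y][x] = col_n[y]
--                 elif x==n: A[y][x] = col_m[y]
--     return (mi,ma)
-- ===== SOURCE B (Python) =====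
-- def es55(sel, m, n, A):
--     flat = [e for row in A for e in row]
--     if sel == 'r':
--         A[m], A[n] = A[n], A[m]
--     else:
--         for row in A:
--             row[m], row[n] = row[n], row[m]
--     return (min(flat), max(flat))
-- ===== Notes on version B (the rewrite author's own statement) =====
-- stated objective: simpler
-- what changed: B flattens the matrix once and calls min/max on the flat list instead of A's index-driven nested scan with None sentinels, and swaps rows/columns with tuple assignment in one pass instead of A's build-two-columns-then-rewrite-every-cell double loop.
-- outside the precondition, e.g. on es55('r', 0, 0, [[1], [2, 5]]): A returns (1, 2), B returns (1, 5)
import Mathlib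
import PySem

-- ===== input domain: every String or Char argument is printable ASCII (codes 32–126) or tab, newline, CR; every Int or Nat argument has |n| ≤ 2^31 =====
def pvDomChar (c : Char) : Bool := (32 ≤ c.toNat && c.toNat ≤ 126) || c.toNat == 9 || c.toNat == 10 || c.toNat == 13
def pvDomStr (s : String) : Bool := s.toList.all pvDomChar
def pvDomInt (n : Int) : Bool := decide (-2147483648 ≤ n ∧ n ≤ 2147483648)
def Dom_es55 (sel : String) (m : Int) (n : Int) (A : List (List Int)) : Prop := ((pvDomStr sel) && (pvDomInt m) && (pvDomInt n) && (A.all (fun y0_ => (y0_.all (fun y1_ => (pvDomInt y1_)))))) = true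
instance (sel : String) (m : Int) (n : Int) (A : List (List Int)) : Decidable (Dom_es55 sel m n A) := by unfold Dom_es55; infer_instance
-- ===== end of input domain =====

-- B flattens the matrix once and uses min/max on the flat list instead of A's index-driven
-- nested scan with None sentinels; equivalence is about the RETURN value only (both Pythons
-- also mutate A in place; the swap side effect is not modeled by the ports).


-- ===== PORT A =====
-- one step of A's scan: updates the (mi, ma) Option accumulators exactly as A's two ifs do
def es55Step (st : Option Int × Option Int) (e : Int) : Option Int × Option Int :=
  (match st.1 with | none => some e | some mi => if e < mi then some e else some mi,
   match st.2 with | none => some e | some ma => if ma < e then some e else some ma)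

-- Port of A (return value only; A's in-place row/column swap does not affect the returned pair).
def es55 (sel : String) (m : Int) (n : Int) (A : List (List Int)) : Int × Int :=
  let st := (PySem.List.pyRange 0 (A.length : Int) 1).foldl
    (fun st y =>
      (PySem.List.pyRange 0 ((PySem.List.pyGetD A 0 []).length : Int) 1).foldl
        (fun st x => es55Step st (PySem.List.pyGetD (PySem.List.pyGetD A y []) x 0)) st)
    (none, none)
  (st.1.getD 0, st.2.getD 0)

-- ===== PORT B =====
def es55_alt (sel : String) (m : Int) (n : Int) (A : List (List Int)) : Int × Int :=
  let flat := A.flatMap (fun row => row)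
  ((PySem.List.min? flat (fun e => e)).getD 0, (PySem.List.max? flat (fun e => e)).getD 0)

-- ===== PRECONDITION & SPEC =====
-- Pre_ restricts to the function's natural domain: a nonempty rectangular matrix (else A's scan
-- raises IndexError or A returns (None, None), not a pair of ints; on ragged matrices with rows
-- LONGER than row 0, A returns a value scanning only the first len(A[0]) columns — an artefact of
-- its index loop over a "matrix" the docstring does not admit — while B scans every element),
-- and swap indices inside Python's (negative-wrapping) range so neither side raises.
def Pre_es55 (sel : String) (m : Int) (n : Int) (A : List (List Int)) : Prop :=
  A ≠ [] ∧ (A.headD []) ≠ [] ∧ (∀ row ∈ A, row.length = (A.headD []).length) ∧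
  (if sel = "r" then
     -(A.length : Int) ≤ m ∧ m < A.length ∧ -(A.length : Int) ≤ n ∧ n < A.length
   else
     -((A.headD []).length : Int) ≤ m ∧ m < (A.headD []).length ∧
     -((A.headD []).length : Int) ≤ n ∧ n < (A.headD []).length)
instance (sel : String) (m : Int) (n : Int) (A : List (List Int)) : Decidable (Pre_es55 sel m n A) := by unfold Pre_es55; infer_instance

def pvWitness_es55 : String × Int × Int × List (List Int) := ("c", 0, 1, [[2, 0, -4], [5, 10, 20], [5, 1, -1]])

def Spec_es55 (sel : String) (m : Int) (n : Int) (A : List (List Int)) (out : Int × Int) : Prop := out = es55_alt sel m n A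
instance (sel : String) (m : Int) (n : Int) (A : List (List Int)) (out : Int × Int) : Decidable (Spec_es55 sel m n A out) := by unfold Spec_es55; infer_instance

-- ===== CLAIM (what is proved, stated in full; the proofs are below) =====
def Claim_equal_es55 : Prop := ∀ (sel : String) (m : Int) (n : Int) (A : List (List Int)), Dom_es55 sel m n A → Pre_es55 sel m n A → Spec_es55 sel m n A (es55 sel m n A)

-- ===== LEMMAS AND PROOFS =====

-- A's one-step update on an already-initialised min accumulator is 'min'
lemma ifMin (a e : Int) : (if e < a then (some e : Option Int) else some a) = some (min a e) := by
  simp only [min_def]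
  split_ifs <;> simp_all <;> omega

lemma ifMax (a e : Int) : (if a < e then (some e : Option Int) else some a) = some (max a e) := by
  simp only [max_def]
  split_ifs <;> simp_all <;> omega

lemma foldl_miStep (t : List Int) (a : Int) :
    t.foldl (fun o e => match o with | none => some e | some mi => if e < mi then some e else some mi) (some a)
      = some (t.foldl min a) := by
  induction t generalizing a with
  | nil => rfl
  | cons x t ih =>
    simp only [List.foldl_cons]
    rw [ifMin, ih]

lemma foldl_maStep (t : List Int) (a : Int) :
    t.foldl (fun o e => match o with | none => some e | some ma => if ma < e then some e else some ma) (some a)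
      = some (t.foldl max a) := by
  induction t generalizing a with
  | nil => rfl
  | cons x t ih =>
    simp only [List.foldl_cons]
    rw [ifMax, ih]

-- the whole verdict
set_option maxHeartbeats 1000000 in
theorem es55_spec : Claim_equal_es55 := by
  intro sel m n A _ hPre
  obtain ⟨hA, hr0, hrect, -⟩ := hPre
  unfold Spec_es55
  dsimp only [es55, es55_alt]
  -- inner loop over indices of row 0's length = fold over the row's own elements (rectangularity)
  have hinner : ∀ (st : Option Int × Option Int) (y : Int), y ∈ PySem.List.pyRange 0 (A.length : Int) 1 →
      (PySem.List.pyRange 0 ((PySem.List.pyGetD A 0 []).length : Int) 1).foldl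
        (fun st x => es55Step st (PySem.List.pyGetD (PySem.List.pyGetD A y []) x 0)) st
      = (PySem.List.pyGetD A y []).foldl es55Step st := by
    intro st y hy
    rw [PySem.List.mem_pyRange_one] at hy
    obtain ⟨k, rfl⟩ : ∃ k : Nat, y = (k : Int) := ⟨y.toNat, by omega⟩
    have hylt : k < A.length := by exact_mod_cast hy.2
    have hrow : PySem.List.pyGetD A (k : Int) [] = A[k] := by
      rw [PySem.List.pyGetD_natCast]
      simp [List.getD, hylt, List.getElem?_eq_getElem]
    have hlen : ((PySem.List.pyGetD A 0 []).length : Int) = ((PySem.List.pyGetD A (k : Int) []).length : Int) := by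
      cases A with
      | nil => simp at hylt
      | cons r0 rest =>
        rw [hrow]
        have h0 : PySem.List.pyGetD (r0 :: rest) (0 : Int) [] = r0 := by
          simp [PySem.List.pyGetD, PySem.List.pyIdx?]
        rw [h0, hrect _ (List.getElem_mem hylt)]
        simp
    rw [hlen, hrow]  -- then the inner index loop is the row fold
    exact PySem.List.foldl_pyRange_zero_pyGetD' (f := es55Step) (xs := A[k]) (d := 0) (init := st)
  rw [PySem.List.foldl_congr_mem _ _ (fun st y => (PySem.List.pyGetD A y []).foldl es55Step st) _ hinner]
  rw [PySem.List.foldl_pyRange_zero_pyGetD' A [] (fun st row => row.foldl es55Step st) ((none, none) : Option Int × Option Int)]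
  -- fold over rows of a fold over elements = fold over the flattened list
  rw [show (A.foldl (fun st row => row.foldl es55Step st) ((none, none) : Option Int × Option Int))
        = (A.flatMap (fun row => row)).foldl es55Step (none, none) by
      rw [show A.flatMap (fun row => row) = A.flatten from by simp]
      exact Eq.symm List.foldl_flatten]
  -- the flat list is nonempty: its first row is nonempty
  obtain ⟨r0, rest, rfl⟩ : ∃ r0 rest, A = r0 :: rest := by
    cases A with | nil => exact absurd rfl hA | cons a b => exact ⟨a, b, rfl⟩
  obtain ⟨e0, t0, rfl⟩ : ∃ e0 t0, r0 = e0 :: t0 := by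
    cases r0 with | nil => simp at hr0 | cons a b => exact ⟨a, b, rfl⟩
  -- split the paired fold into the two independent accumulators and close with min?/max?
  simp only [List.flatMap_cons, List.cons_append, List.foldl_cons]
  have hsplit : ∀ (l : List Int) (a b : Option Int),
      l.foldl es55Step (a, b)
        = (l.foldl (fun o e => match o with | none => some e | some mi => if e < mi then some e else some mi) a,
           l.foldl (fun o e => match o with | none => some e | some ma => if ma < e then some e else some ma) b) := by
    intro l
    induction l with
    | nil => intro a b; rfl
    | cons x t ih => intro a b; simp [List.foldl_cons, es55Step, ih]
  have hstep0 : es55Step (none, none) e0 = (some e0, some e0) := rfl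
  rw [hstep0, hsplit, foldl_miStep, foldl_maStep]
  rw [PySem.List.min?_id_cons, PySem.List.max?_id_cons]
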